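-- pv_equiv track=rewrite | github.com/7ngg/itstep | prac/prac_Farmanov_19.01.py | minmax_mlt
-- ===== SOURCE A (Python) =====
-- def minmax_mlt(input_list: list):            #Произведение чисел между наименьшим и наибольшим значением списка
--     minimum = input_list[0]
--     maximum = input_list[0]
--     result = 1
--
--     for i in range(len(input_list)):
--         if input_list[i] < minimum:
--             minimum = input_list[i]
--         elif maximum < input_list[i]:
--             maximum = input_list[i]
--
--     while minimum <= maximum:
--         result = result * minimum
--         minimum = minimum + 1
--
--     return result
-- ===== SOURCE B (Python) =====
-- def minmax_mlt(input_list: list):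
--     lo = min(input_list)
--     hi = max(input_list)
--     if lo <= 0 <= hi:
--         return 0
--
--     def prod(a, b):
--         # product of integers a..b (inclusive), balanced divide & conquer
--         if b <= a:
--             return a
--         m = (a + b) // 2
--         return prod(a, m) * prod(m + 1, b)
--
--     return prod(lo, hi)
-- ===== Notes on version B (the rewrite author's own statement) =====
-- stated objective: faster
-- what changed: B finds min/max with the builtins and computes the range product by a zero short-circuit plus a balanced divide-and-conquer product tree instead of A's one-by-one left-to-right multiplication loop.
import Mathlib
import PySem

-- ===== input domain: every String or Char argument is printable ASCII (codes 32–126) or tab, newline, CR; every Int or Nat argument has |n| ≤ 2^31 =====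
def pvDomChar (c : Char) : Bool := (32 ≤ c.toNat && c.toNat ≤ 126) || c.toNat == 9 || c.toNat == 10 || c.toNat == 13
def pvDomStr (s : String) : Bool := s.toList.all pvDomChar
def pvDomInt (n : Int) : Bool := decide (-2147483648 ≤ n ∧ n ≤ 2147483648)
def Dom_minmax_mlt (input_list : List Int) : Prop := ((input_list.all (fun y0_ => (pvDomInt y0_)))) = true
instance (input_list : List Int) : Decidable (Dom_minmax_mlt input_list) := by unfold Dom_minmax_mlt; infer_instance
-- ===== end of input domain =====

-- B replaces A's one-by-one product loop from min to max by a zero short-circuit plus a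
-- balanced divide-and-conquer product tree over the range (objective: faster big-int product).

-- ===== PORT A =====
-- the min/max scanning step of A's for-loop (if v < minimum … elif maximum < v …)
def pvAStep (st : Int × Int) (v : Int) : Int × Int :=
  if v < st.1 then (v, st.2) else if st.2 < v then (st.1, v) else st

-- A's while loop: result = result * minimum; minimum += 1
def pvALoop (minimum maximum result : Int) : Int :=
  if minimum ≤ maximum then pvALoop (minimum + 1) maximum (result * minimum) else result
termination_by (maximum + 1 - minimum).toNat
decreasing_by omega

def minmax_mlt (input_list : List Int) : Int :=
  let minimum := PySem.List.pyGetD input_list 0 0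
  let maximum := PySem.List.pyGetD input_list 0 0
  let st := (PySem.List.pyRange 0 (PySem.List.len input_list) 1).foldl
      (fun st i => pvAStep st (PySem.List.pyGetD input_list i 0)) (minimum, maximum)
  pvALoop st.1 st.2 1

-- ===== PORT B =====
-- balanced divide-and-conquer product of the integers a..b (inclusive), Source B's prod
def pvProdTree (a b : Int) : Int :=
  if b ≤ a then a
  else
    let m := PySem.Int.floordiv (a + b) 2
    pvProdTree a m * pvProdTree (m + 1) b
termination_by (b - a).toNat
decreasing_by
  · simp only [PySem.Int.floordiv] at *
    rw [Int.fdiv_eq_ediv] at *; omega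
  · simp only [PySem.Int.floordiv] at *
    rw [Int.fdiv_eq_ediv] at *; omega

def minmax_mlt_alt (input_list : List Int) : Int :=
  let lo := (PySem.List.min? input_list (fun x => x)).getD 0
  let hi := (PySem.List.max? input_list (fun x => x)).getD 0
  if lo ≤ 0 ∧ 0 ≤ hi then 0 else pvProdTree lo hi

-- ===== PRECONDITION & SPEC =====
-- A raises IndexError on the empty list (input_list[0]); Pre_ excludes exactly that input.
def Pre_minmax_mlt (input_list : List Int) : Prop := input_list ≠ []
instance (input_list : List Int) : Decidable (Pre_minmax_mlt input_list) := by
  unfold Pre_minmax_mlt; infer_instance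
def pvWitness_minmax_mlt : List Int := [1, 2]

def Spec_minmax_mlt (input_list : List Int) (out : Int) : Prop := out = minmax_mlt_alt input_list
instance (input_list : List Int) (out : Int) : Decidable (Spec_minmax_mlt input_list out) := by
  unfold Spec_minmax_mlt; infer_instance

-- ===== CLAIM (what is proved, stated in full; the proofs are below) =====
def Claim_equal_minmax_mlt : Prop := ∀ (input_list : List Int), Dom_minmax_mlt input_list → Pre_minmax_mlt input_list → Spec_minmax_mlt input_list (minmax_mlt input_list)

-- ===== LEMMAS AND PROOFS =====

-- sequential product of a..b, the reference both ports are reduced to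
def pvSeq (a b : Int) : Int :=
  if a ≤ b then a * pvSeq (a + 1) b else 1
termination_by (b + 1 - a).toNat
decreasing_by omega

theorem pvALoop_eq_seq : ∀ (n : Nat) (a b r : Int), (b + 1 - a).toNat = n →
    pvALoop a b r = r * pvSeq a b := by
  intro n
  induction n with
  | zero =>
    intro a b r hn
    have h : ¬ a ≤ b := by omega
    rw [pvALoop, if_neg h, pvSeq, if_neg h]; ring
  | succ k ih =>
    intro a b r hn
    by_cases h : a ≤ b
    · rw [pvALoop, if_pos h, pvSeq, if_pos h, ih (a + 1) b (r * a) (by omega)]; ring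
    · rw [pvALoop, if_neg h, pvSeq, if_neg h]; ring

theorem pvSeq_split (b : Int) : ∀ (n : Nat) (a m : Int), (m - a).toNat = n → a ≤ m → m ≤ b →
    pvSeq a b = pvSeq a m * pvSeq (m + 1) b := by
  intro n
  induction n with
  | zero =>
    intro a m hn h1 h2
    have ham : a = m := by omega
    subst ham
    have e1 : pvSeq a a = a * pvSeq (a + 1) a := by rw [pvSeq, if_pos le_rfl]
    have e2 : pvSeq (a + 1) a = 1 := by rw [pvSeq, if_neg (by omega)]
    have e3 : pvSeq a b = a * pvSeq (a + 1) b := by rw [pvSeq, if_pos h2]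
    rw [e1, e2, e3]; ring
  | succ k ih =>
    intro a m hn h1 h2
    have e1 : pvSeq a b = a * pvSeq (a + 1) b := by rw [pvSeq, if_pos (by omega)]
    have e2 : pvSeq a m = a * pvSeq (a + 1) m := by rw [pvSeq, if_pos h1]
    rw [e1, e2, ih (a + 1) m (by omega) (by omega) h2]; ring

theorem pvSeq_zero : ∀ (n : Nat) (a b : Int), (0 - a).toNat = n → a ≤ 0 → 0 ≤ b →
    pvSeq a b = 0 := by
  intro n
  induction n with
  | zero =>
    intro a b hn h1 h2
    have : a = 0 := by omega
    subst this
    rw [pvSeq, if_pos h2]; ring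
  | succ k ih =>
    intro a b hn h1 h2
    rw [pvSeq, if_pos (by omega), ih (a + 1) b (by omega) (by omega) h2]
    ring

theorem pvProdTree_eq_seq (a b : Int) (h : a ≤ b) : pvProdTree a b = pvSeq a b := by
  fun_induction pvProdTree a b with
  | case1 a b hle =>
    have : a = b := by omega
    subst this
    rw [pvSeq, if_pos le_rfl, pvSeq, if_neg (by omega)]; ring
  | case2 a b hlt m ih1 ih2 =>
    have hm1 : a ≤ m ∧ m < b := by
      constructor <;>
      · simp only [m, PySem.Int.floordiv]
        rw [Int.fdiv_eq_ediv]; omega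
    rw [ih1 hm1.1, ih2 (by omega), pvSeq_split b (m - a).toNat a m rfl hm1.1 (by omega)]

theorem pvAFold_minmax : ∀ (l : List Int) (mn mx : Int), mn ≤ mx →
    l.foldl pvAStep (mn, mx) = (l.foldl min mn, l.foldl max mx) := by
  intro l
  induction l with
  | nil => intro mn mx _; rfl
  | cons v t ih =>
    intro mn mx h
    simp only [List.foldl_cons]
    by_cases h1 : v < mn
    · have e : pvAStep (mn, mx) v = (v, mx) := by simp [pvAStep, h1]
      have e1 : min mn v = v := by omega
      have e2 : max mx v = mx := by omega
      rw [e, e1, e2, ih v mx (by omega)]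
    · by_cases h2 : mx < v
      · have e : pvAStep (mn, mx) v = (mn, v) := by simp [pvAStep, h1, h2]
        have e1 : min mn v = mn := by omega
        have e2 : max mx v = v := by omega
        rw [e, e1, e2, ih mn v (by omega)]
      · have e : pvAStep (mn, mx) v = (mn, mx) := by simp [pvAStep, h1, h2]
        have e1 : min mn v = mn := by omega
        have e2 : max mx v = mx := by omega
        rw [e, e1, e2, ih mn mx h]

theorem pvFoldl_min_le (t : List Int) : ∀ x : Int, t.foldl min x ≤ x := by
  induction t with
  | nil => intro x; exact le_rfl
  | cons v t ih => intro x; exact le_trans (ih (min x v)) (by omega)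

theorem pvFoldl_le_max (t : List Int) : ∀ x : Int, x ≤ t.foldl max x := by
  induction t with
  | nil => intro x; exact le_rfl
  | cons v t ih => intro x; exact le_trans (by omega : x ≤ max x v) (ih (max x v))

-- ===== VERDICT (by name: the statement is the Claim_ definition above) =====
theorem minmax_mlt_spec : Claim_equal_minmax_mlt := by
  intro l _ hpre
  unfold Spec_minmax_mlt
  simp only [minmax_mlt, minmax_mlt_alt]
  obtain ⟨x, t, rfl⟩ := List.exists_cons_of_ne_nil hpre
  rw [PySem.List.foldl_pyRange_zero_pyGetD]
  simp only [PySem.List.pyGetD_zero_cons, PySem.List.min?_id_cons, PySem.List.max?_id_cons,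
    Option.getD_some]
  rw [pvAFold_minmax (x :: t) x x le_rfl]
  simp only [List.foldl_cons, min_self, max_self]
  have hle : t.foldl min x ≤ t.foldl max x :=
    le_trans (pvFoldl_min_le t x) (pvFoldl_le_max t x)
  rw [pvALoop_eq_seq (t.foldl max x + 1 - t.foldl min x).toNat _ _ _ rfl, one_mul]
  by_cases hz : t.foldl min x ≤ 0 ∧ 0 ≤ t.foldl max x
  · rw [if_pos hz, pvSeq_zero (0 - t.foldl min x).toNat _ _ rfl hz.1 hz.2]
  · rw [if_neg hz, pvProdTree_eq_seq _ _ hle]
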